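-- pv_equiv track=rewrite | github.com/Mingyao8/algorithm_python | rod_cutting.py | extended_bottom_up_cut_rod
-- ===== SOURCE A (Python) =====
-- def extended_bottom_up_cut_rod(prices, n):
--     r = [0]
--     s = [0]
--     for i in range(1,n+1):
--         r.append(float("-inf"))
--         s.append(0)
--
--         for j in range(1,i+1):
--             if (r[i] < prices[j]+r[i-j]):
--                 r[i] = prices[j]+r[i-j]
--                 s[i] = j
--     return r,s
-- ===== SOURCE B (Python) =====
-- def extended_bottom_up_cut_rod(prices, n):
--     m = n if n > 0 else 0
--     r = [0] + [float("-inf")] * m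
--     s = [0] * (m + 1)
--     for i in range(m):
--         for j in range(1, m - i + 1):
--             c = r[i] + prices[j]
--             if c >= r[i + j]:
--                 r[i + j] = c
--                 s[i + j] = j
--     return r, s
-- ===== Notes on version B (the rewrite author's own statement) =====
-- stated objective: alternative
-- what changed: B replaces A's backward 'gather' DP (for each length i, scan all first cuts j and improve freshly appended cells under strict <) by a forward 'push' relaxation over preallocated arrays: for each settled length i it relaxes r[i+j] with candidate r[i]+prices[j] under >=, so the last-arriving (smallest) first cut wins ties, matching A's first-maximum rule.
import Mathlib
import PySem

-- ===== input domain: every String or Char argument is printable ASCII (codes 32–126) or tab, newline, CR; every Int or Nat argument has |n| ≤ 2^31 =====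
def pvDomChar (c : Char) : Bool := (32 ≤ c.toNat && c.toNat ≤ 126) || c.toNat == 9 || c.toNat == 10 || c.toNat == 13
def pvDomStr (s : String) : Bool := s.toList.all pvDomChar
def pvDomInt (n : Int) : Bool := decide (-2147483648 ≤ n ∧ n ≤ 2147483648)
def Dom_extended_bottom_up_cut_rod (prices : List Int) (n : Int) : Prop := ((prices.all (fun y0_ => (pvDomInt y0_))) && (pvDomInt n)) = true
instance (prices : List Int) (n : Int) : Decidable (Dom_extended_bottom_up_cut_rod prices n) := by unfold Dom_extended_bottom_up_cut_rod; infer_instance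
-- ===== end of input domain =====

-- B replaces A's backward gather DP (strict-< improvement into appended cells) by a forward
-- push relaxation (>= update into preallocated arrays); same tables, a different algorithm.

-- ===== PORT A =====
-- A's inner-loop body, named: update (r[i], s[i]) on strict improvement; `none` is float("-inf").
def bestFold (f : Int → Int) (st : Option Int × Int) (j : Int) : Option Int × Int :=
  match st with
  | (none, _) => (some (f j), j)                          -- -inf < cand always
  | (some cur, sj) => if cur < f j then (some (f j), j) else (some cur, sj)
-- A's outer-loop body: A's in-place cell r[i] is the inner fold accumulator's first component
-- (the inner loop only reads finalized entries r[i-j], j ≥ 1), and the finished value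
-- cur.getD 0 is appended (cur is `some` whenever the inner loop ran, i.e. for every i ≥ 1).
def stepA (prices : List Int) (rs : List Int × List Int) (i : Int) : List Int × List Int :=
  let inner :=
    (PySem.List.pyRange 1 (i + 1) 1).foldl
      (bestFold (fun j => PySem.List.pyGetD prices j 0 + PySem.List.pyGetD rs.1 (i - j) 0))
      (none, 0)
  (rs.1 ++ [inner.1.getD 0], rs.2 ++ [inner.2])

def extended_bottom_up_cut_rod (prices : List Int) (n : Int) : List Int × List Int :=
  (PySem.List.pyRange 1 (n + 1) 1).foldl (stepA prices) ([0], [0])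

-- ===== PORT B =====
-- Python float comparison c >= cell, with `none` = float("-inf") (-inf >= -inf is True).
def geOpt : Option Int → Option Int → Bool
  | none, none => true
  | none, some _ => false
  | some _, none => true
  | some a, some b => decide (b ≤ a)

-- B's inner-loop body: relax cell i+j with candidate c = r[i] + prices[j].
def updB (prices : List Int) (i : Int) (rs : List (Option Int) × List Int) (j : Int) :
    List (Option Int) × List Int :=
  let c : Option Int := (PySem.List.pyGetD rs.1 i none).map (· + PySem.List.pyGetD prices j 0)
  if geOpt c (PySem.List.pyGetD rs.1 (i + j) none)
  then (PySem.List.pySetD rs.1 (i + j) c, PySem.List.pySetD rs.2 (i + j) j)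
  else rs

-- B's outer-loop body.
def stepB (prices : List Int) (m : Int) (rs : List (Option Int) × List Int) (i : Int) :
    List (Option Int) × List Int :=
  (PySem.List.pyRange 1 (m - i + 1) 1).foldl (updB prices i) rs

def extended_bottom_up_cut_rod_alt (prices : List Int) (n : Int) : List Int × List Int :=
  let m : Int := if n > 0 then n else 0
  let r0 : List (Option Int) := [some 0] ++ List.replicate m.toNat none   -- none = float("-inf")
  let s0 : List Int := List.replicate (m.toNat + 1) 0
  let rs := (PySem.List.pyRange 0 m 1).foldl (stepB prices m) (r0, s0)
  -- every cell 1..m is relaxed at source i = 0, so no `none` survives; the default is unreachable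
  (rs.1.map (fun v => v.getD 0), rs.2)

-- ===== PRECONDITION & SPEC =====
-- Pre_ excludes exactly the inputs where A raises IndexError (prices[j] for some 1 ≤ j ≤ n out of range).
def Pre_extended_bottom_up_cut_rod (prices : List Int) (n : Int) : Prop :=
  n ≤ 0 ∨ n < (prices.length : Int)
instance (prices : List Int) (n : Int) : Decidable (Pre_extended_bottom_up_cut_rod prices n) := by
  unfold Pre_extended_bottom_up_cut_rod; infer_instance
def pvWitness_extended_bottom_up_cut_rod : List Int × Int := ([0, 1, 5, 8], 3)
def Spec_extended_bottom_up_cut_rod (prices : List Int) (n : Int) (out : List Int × List Int) : Prop := out = extended_bottom_up_cut_rod_alt prices n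
instance (prices : List Int) (n : Int) (out : List Int × List Int) : Decidable (Spec_extended_bottom_up_cut_rod prices n out) := by unfold Spec_extended_bottom_up_cut_rod; infer_instance

-- ===== CLAIM (what is proved, stated in full; the proofs are below) =====
def Claim_equal_extended_bottom_up_cut_rod : Prop := ∀ (prices : List Int) (n : Int), Dom_extended_bottom_up_cut_rod prices n → Pre_extended_bottom_up_cut_rod prices n → Spec_extended_bottom_up_cut_rod prices n (extended_bottom_up_cut_rod prices n)

-- ===== LEMMAS AND PROOFS =====

-- spec-side version of B's relaxation once the candidate is known finite
def geStep (f : Int → Int) (st : Option Int × Int) (j : Int) : Option Int × Int :=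
  if geOpt (some (f j)) st.1 then (some (f j), j) else st

-- A's tables as a Nat recursion (one row per step)
def rtab (prices : List Int) : Nat → List Int × List Int
  | 0 => ([0], [0])
  | k + 1 => stepA prices (rtab prices k) ((k : Int) + 1)

-- the finished revenue / first-cut values of row k
def Rv (prices : List Int) (k : Nat) : Int := (rtab prices k).1.getD k 0
def Sv (prices : List Int) (k : Nat) : Int := (rtab prices k).2.getD k 0

-- the key function of row t, written as B computes candidates (r[i] + prices[j], i = t - j)
def cellF (prices : List Int) (t : Nat) (j : Int) : Int :=
  Rv prices (t - j.toNat) + PySem.List.pyGetD prices j 0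

-- B's cell (r[t], s[t]) after sources 0..i-1 have been processed: the fold of the
-- candidates j = t, t-1, ..., t - min i t + 1 in arrival order under the >=-relaxation
def cellAt (prices : List Int) (i t : Nat) : Option Int × Int :=
  if t = 0 then (some 0, 0)
  else ((PySem.List.pyRange ((t : Int) - (min i t : Nat) + 1) ((t : Int) + 1) 1).reverse).foldl
         (geStep (cellF prices t)) (none, 0)

-- B's full state after sources 0..i-1
def stateAt (prices : List Int) (M i : Nat) : List (Option Int) × List Int :=
  ((List.range (M + 1)).map (fun (t : Nat) => (cellAt prices i t).1),
   (List.range (M + 1)).map (fun (t : Nat) => (cellAt prices i t).2))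

-- B's state in the middle of source i: cells t < b already hold source i's candidate
def stateMix (prices : List Int) (M i : Nat) (b : Int) : List (Option Int) × List Int :=
  ((List.range (M + 1)).map (fun (t : Nat) => (cellAt prices (if (t : Int) < b then i + 1 else i) t).1),
   (List.range (M + 1)).map (fun (t : Nat) => (cellAt prices (if (t : Int) < b then i + 1 else i) t).2))

lemma swap_step (f : Int → Int) (v w a x : Int) :
    geStep f (bestFold f (some v, w) a) x = bestFold f (geStep f (some v, w) x) a := by
  simp only [bestFold, geStep, geOpt]
  by_cases h1 : v < f a <;> by_cases h2 : v ≤ f x <;> by_cases h3 : f a ≤ f x <;>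
    simp [h1, h2, h3] <;> omega

lemma swap_lemma (f : Int → Int) : ∀ (t : List Int) (v w x : Int),
    geStep f (t.foldl (bestFold f) (some v, w)) x
      = t.foldl (bestFold f) (geStep f (some v, w) x) := by
  intro t
  induction t with
  | nil => intro v w x; rfl
  | cons a t ih =>
    intro v w x
    simp only [List.foldl_cons]
    have hb : bestFold f (some v, w) a
        = (some (if v < f a then f a else v), if v < f a then a else w) := by
      simp only [bestFold]; split_ifs <;> rfl
    rw [hb, ih, ← hb, swap_step]

lemma rev_lemma (f : Int → Int) : ∀ (js : List Int),
    (js.reverse).foldl (geStep f) (none, 0) = js.foldl (bestFold f) (none, 0) := by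
  intro js
  induction js with
  | nil => rfl
  | cons x t ih =>
    simp only [List.reverse_cons, List.foldl_append, List.foldl_cons, List.foldl_nil, ih]
    cases t with
    | nil => rfl
    | cons a t' =>
      simp only [List.foldl_cons]
      have h0 : bestFold f (none, 0) a = (some (f a), a) := rfl
      have h1 : bestFold f (none, 0) x = (some (f x), x) := rfl
      rw [h0, h1, swap_lemma]
      have : geStep f (some (f a), a) x = bestFold f (some (f x), x) a := by
        simp only [geStep, bestFold, geOpt]; split_ifs <;> simp_all; omega
      rw [this]

lemma A_eq_rtab (prices : List Int) (k : Nat) :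
    extended_bottom_up_cut_rod prices (k : Int) = rtab prices k := by
  induction k with
  | zero =>
    simp [extended_bottom_up_cut_rod, rtab]
  | succ k ih =>
    unfold extended_bottom_up_cut_rod
    have hcast : ((k + 1 : Nat) : Int) = (k : Int) + 1 := by push_cast; ring
    rw [hcast, PySem.List.pyRange_one_succ_right (by omega : (1:Int) ≤ (k:Int) + 1),
        List.foldl_append]
    simp only [List.foldl_cons, List.foldl_nil]
    rw [show (PySem.List.pyRange 1 ((k:Int) + 1) 1).foldl (stepA prices) ([0], [0])
          = extended_bottom_up_cut_rod prices (k : Int) from rfl, ih]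
    rfl

lemma rtab_map (prices : List Int) (k : Nat) :
    rtab prices k = ((List.range (k + 1)).map (Rv prices),
                     (List.range (k + 1)).map (Sv prices)) := by
  induction k with
  | zero => rfl
  | succ k ih =>
    have hlen1 : (rtab prices k).1.length = k + 1 := by rw [ih]; simp
    have hstep : rtab prices (k + 1) = stepA prices (rtab prices k) ((k : Int) + 1) := rfl
    obtain ⟨v, b, hvb⟩ : ∃ v b, rtab prices (k+1) = ((rtab prices k).1 ++ [v], (rtab prices k).2 ++ [b]) := by
      exact ⟨_, _, rfl⟩
    have hv : Rv prices (k + 1) = v := by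
      unfold Rv; rw [hvb]; simp [List.getD_eq_getElem?_getD, hlen1]
    have hb : Sv prices (k + 1) = b := by
      have hlen2 : (rtab prices k).2.length = k + 1 := by rw [ih]; simp
      unfold Sv; rw [hvb]; simp [List.getD_eq_getElem?_getD, hlen2]
    rw [hvb, List.range_succ, List.map_append, List.map_append, ih]
    simp [hv, hb]

lemma bestFold_congr {f g : Int → Int} (st : Option Int × Int) (j : Int) (h : f j = g j) :
    bestFold f st j = bestFold g st j := by
  obtain ⟨v, w⟩ := st; cases v <;> simp [bestFold, h]

lemma bestFold_isSome (f : Int → Int) : ∀ (l : List Int) (v w : Int),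
    ∃ v' w', l.foldl (bestFold f) (some v, w) = (some v', w') := by
  intro l
  induction l with
  | nil => exact fun v w => ⟨v, w, rfl⟩
  | cons a l ih =>
    intro v w
    simp only [List.foldl_cons, bestFold]
    split_ifs <;> exact ih _ _

lemma cell_final (prices : List Int) (i t : Nat) (ht : t ≤ i) :
    cellAt prices i t = (some (Rv prices t), Sv prices t) := by
  cases t with
  | zero => simp [cellAt, Rv, Sv, rtab]
  | succ u =>
    have hmin : min i (u + 1) = u + 1 := Nat.min_eq_right ht
    have hstart : ((u + 1 : Nat) : Int) - ((min i (u + 1) : Nat) : Int) + 1 = 1 := by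
      rw [hmin]; omega
    have h1 : cellAt prices i (u + 1)
        = ((PySem.List.pyRange 1 (((u + 1 : Nat) : Int) + 1) 1).reverse).foldl
            (geStep (cellF prices (u + 1))) (none, 0) := by
      simp only [cellAt]; rw [if_neg (by omega), hstart]
    rw [h1, rev_lemma]
    -- identify with stepA's inner fold at row u+1
    have hcongr : (PySem.List.pyRange 1 (((u + 1 : Nat) : Int) + 1) 1).foldl
          (bestFold (cellF prices (u + 1))) (none, 0)
        = (PySem.List.pyRange 1 (((u : Nat) : Int) + 1 + 1) 1).foldl
            (bestFold (fun j => PySem.List.pyGetD prices j 0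
              + PySem.List.pyGetD (rtab prices u).1 (((u : Nat) : Int) + 1 - j) 0)) (none, 0) := by
      rw [show (((u + 1 : Nat) : Int) + 1) = ((u : Nat) : Int) + 1 + 1 by push_cast; ring]
      apply PySem.List.foldl_congr_mem
      intro acc j hj
      obtain ⟨hj1, hj2⟩ := PySem.List.mem_pyRange_one.mp hj
      apply bestFold_congr
      have hidx : PySem.List.pyGetD (rtab prices u).1 (((u : Nat) : Int) + 1 - j) 0
          = Rv prices (u + 1 - j.toNat) := by
        have hlen : ((rtab prices u).1.length : Int) = (u : Int) + 1 := by
          rw [rtab_map]; simp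
        rw [PySem.List.pyGetD_eq_getElem _ 0 (by omega) (by omega)]
        have : (rtab prices u).1 = (List.range (u + 1)).map (Rv prices) := by
          rw [rtab_map]
        rw [List.getElem_of_eq this]
        rw [List.getElem_map, List.getElem_range]
        congr 1
        omega
      rw [hidx]
      simp only [cellF]
      have : (u + 1 - j.toNat) = (u + 1) - j.toNat := rfl
      rw [Int.add_comm]
    rw [hcongr]
    -- the inner fold is exactly what rtab appends at row u+1
    set P := (PySem.List.pyRange 1 (((u : Nat) : Int) + 1 + 1) 1).foldl
        (bestFold (fun j => PySem.List.pyGetD prices j 0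
          + PySem.List.pyGetD (rtab prices u).1 (((u : Nat) : Int) + 1 - j) 0)) (none, 0) with hP
    have hrt : rtab prices (u + 1) = ((rtab prices u).1 ++ [P.1.getD 0], (rtab prices u).2 ++ [P.2]) := rfl
    have hlen1 : (rtab prices u).1.length = u + 1 := by rw [rtab_map]; simp
    have hlen2 : (rtab prices u).2.length = u + 1 := by rw [rtab_map]; simp
    have hRv : Rv prices (u + 1) = P.1.getD 0 := by
      unfold Rv; rw [hrt]; simp [List.getD_eq_getElem?_getD, hlen1]
    have hSv : Sv prices (u + 1) = P.2 := by
      unfold Sv; rw [hrt]; simp [List.getD_eq_getElem?_getD, hlen2]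
    -- P is of the form (some _, _)
    have hne : PySem.List.pyRange 1 (((u : Nat) : Int) + 1 + 1) 1
        = 1 :: PySem.List.pyRange 2 (((u : Nat) : Int) + 1 + 1) 1 := by
      rw [PySem.List.pyRange_one_cons (by omega)]; norm_num
    obtain ⟨v', w', hvw⟩ : ∃ v' w', P = (some v', w') := by
      rw [hP, hne, List.foldl_cons]
      exact bestFold_isSome _ _ _ _
    rw [hRv, hSv, hvw]
    simp

lemma cellAt_congr (prices : List Int) {i i' t : Nat} (h : min i t = min i' t) :
    cellAt prices i t = cellAt prices i' t := by
  simp [cellAt, h]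

lemma cell_le (prices : List Int) {i t : Nat} (ht : t ≤ i) :
    cellAt prices (i + 1) t = cellAt prices i t := by
  exact cellAt_congr prices (by omega)

lemma set_map_range {α : Type} (n k : Nat) (g : Nat → α) (v : α) :
    ((List.range n).map g).set k v
      = (List.range n).map (fun t => if t = k then v else g t) := by
  apply List.ext_getElem
  · simp
  · intro idx h1 h2
    simp only [List.getElem_set, List.getElem_map, List.getElem_range] at *
    split_ifs with h3 h4 h4 <;> first | rfl | omega

lemma cell_succ (prices : List Int) (i t : Nat) (hit : i < t) :
    cellAt prices (i + 1) t = geStep (cellF prices t) (cellAt prices i t) ((t : Int) - i) := by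
  have ht0 : t ≠ 0 := by omega
  have hm1 : min (i + 1) t = i + 1 := by omega
  have hm2 : min i t = i := by omega
  simp only [cellAt, if_neg ht0, hm1, hm2]
  have hsplit : PySem.List.pyRange ((t : Int) - ((i + 1 : Nat) : Int) + 1) ((t : Int) + 1)
      = ((t : Int) - i) :: PySem.List.pyRange ((t : Int) - ((i : Nat) : Int) + 1) ((t : Int) + 1) := by
    rw [show ((t : Int) - ((i + 1 : Nat) : Int) + 1) = (t : Int) - i by push_cast; ring,
        PySem.List.pyRange_one_cons (by omega)]
  rw [hsplit]
  simp only [List.reverse_cons, List.foldl_append, List.foldl_cons, List.foldl_nil]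

lemma upd_core (prices : List Int) (M i : Nat) (a : Int) (ha1 : 1 ≤ a)
    (ha2 : a ≤ (M : Int) - i) :
    updB prices (i : Int) (stateMix prices M i ((i : Int) + a)) a
      = stateMix prices M i ((i : Int) + a + 1) := by
  set t0 : Nat := i + a.toNat with ht0
  have hta : (t0 : Int) = (i : Int) + a := by omega
  have ht0M : t0 < M + 1 := by omega
  have hit0 : i < t0 := by omega
  have hconv : ((i : Int) + a).toNat = t0 := by omega
  have hread_i : PySem.List.pyGetD (stateMix prices M i ((i : Int) + a)).1 (i : Int) none
      = some (Rv prices i) := by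
    simp only [stateMix, PySem.List.pyGetD_natCast]
    rw [List.getD_eq_getElem _ _ (by simp; omega), List.getElem_map, List.getElem_range]
    rw [if_pos (by omega), cell_le prices (le_refl i), cell_final prices i i (le_refl i)]
  have hread_t0 : PySem.List.pyGetD (stateMix prices M i ((i : Int) + a)).1 ((i : Int) + a) none
      = (cellAt prices i t0).1 := by
    simp only [stateMix]
    rw [← hta, PySem.List.pyGetD_natCast]
    rw [List.getD_eq_getElem _ _ (by simp; omega), List.getElem_map, List.getElem_range]
    rw [if_neg (by omega)]
  have hcf : Rv prices i + PySem.List.pyGetD prices a 0 = cellF prices t0 a := by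
    simp only [cellF]
    congr 2
    omega
  have hcell : cellAt prices (i + 1) t0
      = geStep (cellF prices t0) (cellAt prices i t0) a := by
    rw [cell_succ prices i t0 hit0, show (t0 : Int) - i = a by omega]
  unfold updB
  simp only [hread_i, hread_t0, Option.map_some]
  rw [hcf]
  by_cases hg : geOpt (some (cellF prices t0 a)) (cellAt prices i t0).1 = true
  · rw [if_pos hg]
    have hnew : cellAt prices (i + 1) t0 = (some (cellF prices t0 a), a) := by
      rw [hcell]; simp only [geStep, hg, if_pos]
    simp only [stateMix]
    refine Prod.ext ?_ ?_ <;>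
    · dsimp only
      rw [PySem.List.pySetD_of_nonneg _ _ (by omega), hconv, set_map_range]
      apply List.map_congr_left
      intro t htmem
      have htM : t < M + 1 := List.mem_range.mp htmem
      by_cases he : t = t0
      · subst he
        rw [if_pos rfl, if_pos (by omega), hnew]
      · rw [if_neg he]
        by_cases hlt : (t : Int) < (i : Int) + a
        · rw [if_pos hlt, if_pos (by omega)]
        · rw [if_neg hlt, if_neg (by omega)]
  · rw [if_neg hg]
    have hsame : cellAt prices (i + 1) t0 = cellAt prices i t0 := by
      rw [hcell]; simp only [geStep, hg]; simp
    simp only [stateMix]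
    refine Prod.ext ?_ ?_ <;>
    · dsimp only
      apply List.map_congr_left
      intro t htmem
      by_cases he : t = t0
      · subst he
        rw [if_neg (by omega), if_pos (by omega), hsame]
      · by_cases hlt : (t : Int) < (i : Int) + a
        · rw [if_pos hlt, if_pos (by omega)]
        · rw [if_neg hlt, if_neg (by omega)]

lemma inner_aux (prices : List Int) (M i : Nat) : ∀ (d : Nat) (a : Int),
    a = (M : Int) - i + 1 - d → 1 ≤ a →
    (PySem.List.pyRange a ((M : Int) - i + 1) 1).foldl (updB prices (i : Int))
        (stateMix prices M i ((i : Int) + a))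
      = stateMix prices M i ((M : Int) + 1) := by
  intro d
  induction d with
  | zero =>
    intro a had ha1
    rw [PySem.List.pyRange_one_eq_nil (by omega)]
    simp only [List.foldl_nil]
    rw [show (i : Int) + a = (M : Int) + 1 by omega]
  | succ d ih =>
    intro a had ha1
    rw [PySem.List.pyRange_one_cons (by omega)]
    simp only [List.foldl_cons]
    rw [upd_core prices M i a ha1 (by omega),
        show (i : Int) + a + 1 = (i : Int) + (a + 1) by ring]
    exact ih (a + 1) (by omega) (by omega)

lemma inner_lemma (prices : List Int) (M i : Nat) (hi : i < M) :
    stepB prices (M : Int) (stateAt prices M i) (i : Int) = stateAt prices M (i + 1) := by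
  unfold stepB
  have h0 : stateAt prices M i = stateMix prices M i ((i : Int) + 1) := by
    unfold stateAt stateMix
    refine Prod.ext ?_ ?_ <;>
    · dsimp only
      apply List.map_congr_left
      intro t htmem
      by_cases hlt : (t : Int) < (i : Int) + 1
      · rw [if_pos hlt, cell_le prices (by omega)]
      · rw [if_neg hlt]
  have h1 : stateMix prices M i ((M : Int) + 1) = stateAt prices M (i + 1) := by
    unfold stateAt stateMix
    refine Prod.ext ?_ ?_ <;>
    · dsimp only
      apply List.map_congr_left
      intro t htmem
      have := List.mem_range.mp htmem
      rw [if_pos (by omega)]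
  rw [h0, ← h1]
  exact inner_aux prices M i (M - i) 1 (by omega) (le_refl 1)

lemma cell_zero (prices : List Int) (t : Nat) :
    cellAt prices 0 t = if t = 0 then ((some 0 : Option Int), (0 : Int)) else (none, 0) := by
  cases t with
  | zero => rfl
  | succ u =>
    rw [if_neg (by omega)]
    simp only [cellAt, if_neg (by omega : ¬ u + 1 = 0)]
    rw [show min 0 (u + 1) = 0 by omega]
    rw [PySem.List.pyRange_one_eq_nil (by push_cast; omega)]
    rfl

lemma outer_lemma (prices : List Int) (M : Nat) : ∀ i, i ≤ M →
    (PySem.List.pyRange 0 (i : Int) 1).foldl (stepB prices (M : Int))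
        ([some 0] ++ List.replicate M none, List.replicate (M + 1) 0)
      = stateAt prices M i := by
  intro i
  induction i with
  | zero =>
    intro _
    rw [PySem.List.pyRange_one_eq_nil (by omega)]
    simp only [List.foldl_nil]
    unfold stateAt
    refine Prod.ext ?_ ?_ <;>
    · dsimp only
      apply List.ext_getElem
      · simp
      · intro k h1 h2
        simp only [List.getElem_map, List.getElem_range, cell_zero, List.singleton_append]
        cases k with
        | zero => rfl
        | succ j =>
          simp only [List.getElem_cons_succ, List.getElem_replicate]
          rw [if_neg (by omega)]
  | succ i ih =>
    intro hle
    rw [show ((i + 1 : Nat) : Int) = (i : Int) + 1 by push_cast; ring,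
        PySem.List.pyRange_one_succ_right (by omega), List.foldl_append]
    simp only [List.foldl_cons, List.foldl_nil]
    rw [ih (by omega), inner_lemma prices M i (by omega)]

lemma main_eq (prices : List Int) (n : Int) :
    extended_bottom_up_cut_rod prices n = extended_bottom_up_cut_rod_alt prices n := by
  by_cases hn : n ≤ 0
  · unfold extended_bottom_up_cut_rod extended_bottom_up_cut_rod_alt
    rw [PySem.List.pyRange_one_eq_nil (by omega)]
    simp only [if_neg (by omega : ¬ n > 0), List.foldl_nil]
    rw [PySem.List.pyRange_one_eq_nil (le_refl 0)]
    rfl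
  · have hN1 : 1 ≤ n.toNat := by omega
    have hn' : n = ((n.toNat : Nat) : Int) := by omega
    rw [hn', A_eq_rtab prices n.toNat, rtab_map prices n.toNat]
    unfold extended_bottom_up_cut_rod_alt
    simp only [if_pos (by omega : ((n.toNat : Nat) : Int) > 0), Int.toNat_natCast]
    rw [outer_lemma prices n.toNat n.toNat (le_refl _)]
    unfold stateAt
    refine Prod.ext ?_ ?_
    · dsimp only
      rw [List.map_map]
      apply List.map_congr_left
      intro t htmem
      have htle : t ≤ n.toNat := by have := List.mem_range.mp htmem; omega
      simp only [Function.comp_apply]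
      rw [cell_final prices n.toNat t htle]
      rfl
    · dsimp only
      apply List.map_congr_left
      intro t htmem
      have htle : t ≤ n.toNat := by have := List.mem_range.mp htmem; omega
      rw [cell_final prices n.toNat t htle]

-- ===== VERDICT (by name: the statement is the Claim_ definition above) =====
theorem extended_bottom_up_cut_rod_spec : Claim_equal_extended_bottom_up_cut_rod := by
  intro prices n _ _
  unfold Spec_extended_bottom_up_cut_rod
  exact main_eq prices n
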